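-- pv_equiv track=rewrite | github.com/javilledo/project-euler | 035.py | circular_rotation
-- ===== SOURCE A (Python) =====
-- def circular_rotation(n):
--     """
--     Devuelve todas las rotaciones circulares de un número.
--     Por ejemplo: 197 -> [197, 971, 719]
--     """
--     res = []
--     s = str(n)
--     length = len(s)
--
--     for i in range(length):
--         # Rotar: tomar desde posición i hasta el final + desde inicio hasta posición i
--         rotated = s[i:] + s[:i]
--         res.append(int(rotated))
--
--     return res
-- ===== SOURCE B (Python) =====
-- def circular_rotation(n):
--     """
--     Devuelve todas las rotaciones circulares de un número.
--     Por ejemplo: 197 -> [197, 971, 719]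
--     """
--     length = len(str(n))
--     p = 10 ** (length - 1)
--     res = []
--     cur = n
--     for _ in range(length):
--         res.append(cur)
--         cur = (cur % p) * 10 + cur // p
--     return res
-- ===== Notes on version B (the rewrite author's own statement) =====
-- stated objective: alternative
-- what changed: Rotations are computed by pure integer arithmetic (repeatedly splitting off the leading digit with floor division and remainder by the power of ten below the digit count, and re-attaching it at the units end) instead of building each rotation by string slicing and re-parsing it with int().
import Mathlib
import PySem

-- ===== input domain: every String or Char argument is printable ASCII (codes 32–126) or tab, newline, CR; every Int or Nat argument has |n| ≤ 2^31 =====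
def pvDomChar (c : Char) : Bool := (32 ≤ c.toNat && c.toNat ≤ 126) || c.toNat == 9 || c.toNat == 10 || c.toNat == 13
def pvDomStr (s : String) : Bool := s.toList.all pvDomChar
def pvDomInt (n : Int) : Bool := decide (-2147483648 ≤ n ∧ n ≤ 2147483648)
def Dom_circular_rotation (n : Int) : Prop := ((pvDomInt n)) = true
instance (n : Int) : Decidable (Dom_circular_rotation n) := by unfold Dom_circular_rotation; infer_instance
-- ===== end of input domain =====

-- B computes every rotation by integer arithmetic (moving the leading digit to the units place via
-- floor division and remainder by a fixed power of ten) instead of slicing the decimal string and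
-- re-parsing it with int().

-- ===== PORT A =====
-- rotated is a nonempty string of '0'..'9' for every n admitted by Pre_ (0 ≤ n), where Python's
-- int() returns its value; PySem.Int.ofChars? is exact there and the .getD 0 default is unreachable.
def circular_rotation (n : Int) : List Int :=
  let s : List Char := PySem.Int.toChars n
  let length : Int := (s.length : Int)
  (PySem.List.pyRange 0 length 1).foldl
    (fun res i =>
      let rotated : List Char := PySem.List.slice s (some i) none ++ PySem.List.slice s none (some i)
      res ++ [(PySem.Int.ofChars? rotated).getD 0])
    []

-- ===== PORT B =====
-- len(str(n)) ≥ 1 always, so Python's `length - 1` equals the Nat subtraction used here.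
def circular_rotation_alt (n : Int) : List Int :=
  let length : Nat := (PySem.Int.toChars n).length
  let p : Int := 10 ^ (length - 1)
  ((PySem.List.pyRange 0 (length : Int) 1).foldl
    (fun st _ => (st.1 ++ [st.2], PySem.Int.mod st.2 p * 10 + PySem.Int.floordiv st.2 p))
    (([] : List Int), n)).1

-- ===== PRECONDITION & SPEC =====
-- Pre_ excludes exactly the negative n: there str(n) starts with '-', every non-trivial rotation puts the
-- '-' in a non-leading position and Python's int() raises ValueError.
def Pre_circular_rotation (n : Int) : Prop := 0 ≤ n
instance (n : Int) : Decidable (Pre_circular_rotation n) := by unfold Pre_circular_rotation; infer_instance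
def pvWitness_circular_rotation : Int := (197)
def Spec_circular_rotation (n : Int) (out : List Int) : Prop := out = circular_rotation_alt n
instance (n : Int) (out : List Int) : Decidable (Spec_circular_rotation n out) := by unfold Spec_circular_rotation; infer_instance

-- ===== CLAIM (what is proved, stated in full; the proofs are below) =====
def Claim_equal_circular_rotation : Prop := ∀ (n : Int), Dom_circular_rotation n → Pre_circular_rotation n → Spec_circular_rotation n (circular_rotation n)

-- ===== LEMMAS AND PROOFS =====

-- ---- a faithful copy of PySem's (private) int() digit parser, bridged to PySem.Int.ofChars? ----
def crGo : List Char → Bool → Nat → Option Nat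
  | [], afterDigit, acc => if afterDigit = true then some acc else none
  | c :: rest, afterDigit, acc =>
      if c.isDigit = true then crGo rest true (acc * 10 + (c.toNat - '0'.toNat))
      else
        if c = '_' ∧ afterDigit = true then
          match rest with
          | d :: _ => if d.isDigit = true then crGo rest false acc else none
          | [] => none
        else none

def crDigitsVal? : List Char → Option Nat
  | [] => none
  | cs => crGo cs false 0

def crOfChars (s : List Char) : Option Int :=
  have cs := ((s.dropWhile PySem.Int.isIntSpace).reverse.dropWhile PySem.Int.isIntSpace).reverse
  match cs with
  | '-' :: ds => Option.map (fun n => -n) (do let a ← crDigitsVal? ds; pure (a : Int))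
  | '+' :: ds => Option.map (fun n => n) (do let a ← crDigitsVal? ds; pure (a : Int))
  | ds => Option.map (fun n => n) (do let a ← crDigitsVal? ds; pure (a : Int))

def crDigitsValP (g : List Char → Bool → Nat → Option Nat) : List Char → Option Nat
  | [] => none
  | cs => g cs false 0

theorem crBridgeGo (g : List Char → Bool → Nat → Option Nat)
    (hnil : ∀ (b : Bool) (a : Nat), g [] b a = if b = true then some a else none)
    (hg : ∀ (c : Char) (rest : List Char) (b : Bool) (a : Nat),
      g (c :: rest) b a =
        if c.isDigit = true then g rest true (a * 10 + (c.toNat - '0'.toNat))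
        else
          if c = '_' ∧ b = true then
            match rest with
            | d :: _ => if d.isDigit = true then g rest false a else none
            | [] => none
          else none) :
    ∀ cs b a, g cs b a = crGo cs b a := by
  intro cs
  induction cs with
  | nil => intro b a; rw [hnil]; rfl
  | cons c rest ih =>
    intro b a
    rw [hg]
    simp only [ih]
    rfl

theorem crBridgeD (g : List Char → Bool → Nat → Option Nat)
    (hnil : ∀ (b : Bool) (a : Nat), g [] b a = if b = true then some a else none)
    (hg : ∀ (c : Char) (rest : List Char) (b : Bool) (a : Nat),
      g (c :: rest) b a =
        if c.isDigit = true then g rest true (a * 10 + (c.toNat - '0'.toNat))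
        else
          if c = '_' ∧ b = true then
            match rest with
            | d :: _ => if d.isDigit = true then g rest false a else none
            | [] => none
          else none) :
    crDigitsValP g = crDigitsVal? := by
  funext cs
  cases cs with
  | nil => rfl
  | cons c rest =>
    show g (c :: rest) false 0 = crGo (c :: rest) false 0
    exact crBridgeGo g hnil hg _ _ _

-- PySem.Int.ofChars? computed through the copy above (its own parser is private to PySem)
theorem crOfChars_eq : ∀ ds, PySem.Int.ofChars? ds = crOfChars ds := by
  refine (fun hD : ?D = crDigitsVal? => ?body) ?hD
  case body =>
    intro s
    simp only [PySem.Int.ofChars?, crOfChars]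
    rw [← hD]
    rfl
  case hD =>
    refine Eq.trans (?e1 : ?D = crDigitsValP ?G) (crBridgeD ?G ?hnil ?hg)
    case e1 => rfl
    case hnil => intro b a; rfl
    case hg => intro c rest b a; rfl

-- ---- decimal value of a digit-character list ----
def crVal (ds : List Char) : Nat := ds.foldl (fun a c => a * 10 + (c.toNat - 48)) 0

theorem crVal_aux (ds : List Char) : ∀ a : Nat,
    ds.foldl (fun a c => a * 10 + (c.toNat - 48)) a = a * 10 ^ ds.length + crVal ds := by
  induction ds with
  | nil => intro a; simp [crVal]
  | cons c rest ih =>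
    intro a
    simp only [List.foldl_cons, List.length_cons]
    rw [ih (a * 10 + (c.toNat - 48))]
    have h2 : crVal (c :: rest) = (c.toNat - 48) * 10 ^ rest.length + crVal rest := by
      show List.foldl _ 0 (c :: rest) = _
      simp only [List.foldl_cons]
      rw [ih (0 * 10 + (c.toNat - 48))]
      simp [crVal]
    rw [h2]
    ring

theorem crVal_append (xs ys : List Char) :
    crVal (xs ++ ys) = crVal xs * 10 ^ ys.length + crVal ys := by
  simp only [crVal, List.foldl_append]
  rw [show xs.foldl (fun a c => a * 10 + (c.toNat - 48)) 0 = crVal xs from rfl, crVal_aux]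
  rfl

theorem digit_bounds (c : Char) (h : c.isDigit = true) : 48 ≤ c.toNat ∧ c.toNat ≤ 57 := by
  unfold Char.isDigit at h
  rw [Bool.and_eq_true, decide_eq_true_iff, decide_eq_true_iff, ge_iff_le,
    UInt32.le_iff_toNat_le, UInt32.le_iff_toNat_le] at h
  exact h

theorem digit_not_space (c : Char) (h : c.isDigit = true) : PySem.Int.isIntSpace c = false := by
  have hb := digit_bounds c h
  simp only [PySem.Int.isIntSpace, Bool.or_eq_false_iff, decide_eq_false_iff_not]
  and_intros <;> rintro rfl <;> revert hb <;> decide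

theorem crVal_lt (ds : List Char) (h : ∀ c ∈ ds, c.isDigit = true) :
    crVal ds < 10 ^ ds.length := by
  induction ds with
  | nil => simp [crVal]
  | cons c rest ih =>
    have hc := digit_bounds c (h c (by simp))
    have hrest := ih (fun d hd => h d (by simp [hd]))
    have : crVal (c :: rest) = (c.toNat - 48) * 10 ^ rest.length + crVal rest := by
      show List.foldl _ 0 (c :: rest) = _
      simp only [List.foldl_cons]
      rw [crVal_aux rest (0 * 10 + (c.toNat - 48))]
      simp [crVal]
    rw [this, List.length_cons, pow_succ]
    have h9 : c.toNat - 48 ≤ 9 := by omega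
    calc (c.toNat - 48) * 10 ^ rest.length + crVal rest
        < (c.toNat - 48) * 10 ^ rest.length + 10 ^ rest.length := by omega
      _ = (c.toNat - 48 + 1) * 10 ^ rest.length := by ring
      _ ≤ 10 * 10 ^ rest.length := Nat.mul_le_mul_right _ (by omega)
      _ = 10 ^ rest.length * 10 := by ring

theorem crGo_digits (ds : List Char) (h : ∀ c ∈ ds, c.isDigit = true) : ∀ a : Nat,
    crGo ds true a = some (ds.foldl (fun a c => a * 10 + (c.toNat - 48)) a) := by
  induction ds with
  | nil => intro a; rfl
  | cons c rest ih =>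
    intro a
    have hc : c.isDigit = true := h c (by simp)
    simp only [crGo, hc, if_true, List.foldl_cons]
    exact ih (fun d hd => h d (by simp [hd])) _

-- int() of a nonempty pure-digit string is its decimal value
theorem crOfChars_digits (ds : List Char) (hne : ds ≠ []) (h : ∀ c ∈ ds, c.isDigit = true) :
    PySem.Int.ofChars? ds = some (crVal ds) := by
  rw [crOfChars_eq]
  obtain ⟨c, rest, rfl⟩ : ∃ c rest, ds = c :: rest := by
    cases ds with
    | nil => exact absurd rfl hne
    | cons c rest => exact ⟨c, rest, rfl⟩
  have hc : c.isDigit = true := h c (by simp)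
  have hstrip1 : (c :: rest).dropWhile PySem.Int.isIntSpace = c :: rest := by
    rw [List.dropWhile_cons_of_neg]
    simp [digit_not_space c hc]
  have hlast : ∀ (l : List Char), l ≠ [] → (∀ d ∈ l, d.isDigit = true) →
      l.reverse.dropWhile PySem.Int.isIntSpace = l.reverse := by
    intro l hl hd
    obtain ⟨e, t, he⟩ : ∃ e t, l.reverse = e :: t := by
      cases hrev : l.reverse with
      | nil => exact absurd (by simpa using congrArg List.reverse hrev) hl
      | cons e t => exact ⟨e, t, rfl⟩
    rw [he, List.dropWhile_cons_of_neg]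
    have : e ∈ l := by
      have : e ∈ l.reverse := by rw [he]; simp
      simpa using this
    simp [digit_not_space e (hd e this)]
  unfold crOfChars
  rw [hstrip1, hlast (c :: rest) (by simp) h, List.reverse_reverse]
  show (match c :: rest with
    | '-' :: ds => Option.map (fun n => -n) (do let a ← crDigitsVal? ds; pure (a : Int))
    | '+' :: ds => Option.map (fun n => n) (do let a ← crDigitsVal? ds; pure (a : Int))
    | ds => Option.map (fun n => n) (do let a ← crDigitsVal? ds; pure (a : Int))) = _
  have hnm : c ≠ '-' := by
    intro hcm; rw [hcm] at hc; exact absurd hc (by decide)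
  have hnp : c ≠ '+' := by
    intro hcm; rw [hcm] at hc; exact absurd hc (by decide)
  have hDV : crDigitsVal? (c :: rest) = some (crVal (c :: rest)) := by
    show crGo (c :: rest) false 0 = _
    simp only [crGo, hc, if_true]
    rw [crGo_digits rest (fun d hd => h d (by simp [hd])) _]
    show _ = some (List.foldl _ 0 (c :: rest))
    simp [List.foldl_cons]
  split
  · rename_i ds' heq
    exact absurd (List.cons.injEq c rest '-' ds' ▸ heq).1 hnm
  · rename_i ds' heq
    exact absurd (List.cons.injEq c rest '+' ds' ▸ heq).1 hnp
  · rw [hDV]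
    simp

-- ---- the decimal digit string of m ----
theorem digitChar_val (d : Nat) (hd : d < 10) : (Nat.digitChar d).toNat - 48 = d := by
  interval_cases d <;> decide

theorem crVal_toDigits (m : Nat) : crVal (Nat.toDigits 10 m) = m := by
  induction m using Nat.strong_induction_on with
  | _ m ih =>
    rw [Nat.toDigits_eq_if (by norm_num)]
    split
    · rename_i hlt
      show List.foldl _ 0 [_] = m
      simp only [List.foldl_cons, List.foldl_nil]
      rw [Nat.zero_mul, Nat.zero_add, digitChar_val m hlt]
    · rename_i hge
      rw [crVal_append, ih (m / 10) (Nat.div_lt_self (by omega) (by norm_num))]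
      show m / 10 * 10 ^ (1 : Nat) + crVal [_] = m
      have : crVal [(m % 10).digitChar] = m % 10 := by
        show List.foldl _ 0 [_] = m % 10
        simp only [List.foldl_cons, List.foldl_nil]
        rw [Nat.zero_mul, Nat.zero_add, digitChar_val _ (Nat.mod_lt _ (by norm_num))]
      rw [this, pow_one]
      omega

theorem toDigits_len_pos (m : Nat) : 0 < (Nat.toDigits 10 m).length := by
  rw [Nat.toDigits_eq_if (by norm_num)]
  split <;> simp

theorem lt_pow_len (m : Nat) : m < 10 ^ (Nat.toDigits 10 m).length := by
  exact (Nat.length_toDigits_le_iff (by norm_num) (toDigits_len_pos m)).mp (le_refl _)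

-- ---- the i-th rotation, arithmetically ----
def crRot (m L i : Nat) : Nat := (m % 10 ^ (L - i)) * 10 ^ i + m / 10 ^ (L - i)

theorem crRot_zero (m L : Nat) (hm : m < 10 ^ L) : crRot m L 0 = m := by
  unfold crRot
  rw [Nat.sub_zero, pow_zero, mul_one, Nat.mod_eq_of_lt hm, Nat.div_eq_of_lt hm]
  omega

theorem crVal_take_drop (m i : Nat) (hi : i ≤ (Nat.toDigits 10 m).length) :
    crVal ((Nat.toDigits 10 m).take i) = m / 10 ^ ((Nat.toDigits 10 m).length - i) ∧
    crVal ((Nat.toDigits 10 m).drop i) = m % 10 ^ ((Nat.toDigits 10 m).length - i) := by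
  set s := Nat.toDigits 10 m with hs
  have hdig : ∀ c ∈ s, c.isDigit = true :=
    fun c hc => Nat.isDigit_of_mem_toDigits (by norm_num) (by norm_num) hc
  have hdl : (s.drop i).length = s.length - i := List.length_drop ..
  have hdrop : crVal (s.drop i) < 10 ^ (s.length - i) := by
    rw [← hdl]
    exact crVal_lt _ (fun c hc => hdig c (List.mem_of_mem_drop hc))
  have hm : m = crVal (s.drop i) + 10 ^ (s.length - i) * crVal (s.take i) := by
    have h1 : crVal s = m := crVal_toDigits m
    have h2 : s = s.take i ++ s.drop i := (List.take_append_drop i s).symm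
    rw [← h1]
    conv_lhs => rw [h2]
    rw [crVal_append, hdl]
    ring
  constructor
  · rw [hm, Nat.add_mul_div_left _ _ (pow_pos (by norm_num : (0:Nat) < 10) _),
      Nat.div_eq_of_lt hdrop, Nat.zero_add]
  · rw [hm, Nat.add_mul_mod_self_left, Nat.mod_eq_of_lt hdrop]

theorem crRot_step (m L i : Nat) (hm : m < 10 ^ L) (hi : i < L) :
    crRot m L (i + 1) = (crRot m L i % 10 ^ (L - 1)) * 10 + crRot m L i / 10 ^ (L - 1) := by
  have hu1 : 1 ≤ L - i := by omega
  set u := L - i with hudef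
  set q := m / 10 ^ u with hq
  set r := m % 10 ^ u with hr
  set d := r / 10 ^ (u - 1) with hd
  set r' := r % 10 ^ (u - 1) with hr'
  have hp10 : (0:Nat) < 10 ^ (u - 1) := pow_pos (by norm_num : (0:Nat) < 10) _
  have hqlt : q < 10 ^ i := by
    rw [hq, Nat.div_lt_iff_lt_mul (pow_pos (by norm_num : (0:Nat) < 10) _), ← pow_add]
    have : u + i = L := by omega
    rw [Nat.add_comm i u, this]
    exact hm
  have hrlt : r < 10 ^ u := Nat.mod_lt _ (pow_pos (by norm_num : (0:Nat) < 10) _)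
  have hr'lt : r' < 10 ^ (u - 1) := Nat.mod_lt _ hp10
  have hpow : 10 ^ (u - 1) * 10 ^ i = 10 ^ (L - 1) := by
    rw [← pow_add]; congr 1; omega
  have e1 : crRot m L i = (r' * 10 ^ i + q) + 10 ^ (L - 1) * d := by
    unfold crRot
    rw [← hudef, ← hq, ← hr]
    have : r = 10 ^ (u - 1) * d + r' := by rw [hd, hr']; exact (Nat.div_add_mod r _).symm
    rw [this]
    rw [Nat.add_mul, Nat.mul_assoc, Nat.mul_comm d (10 ^ i), ← Nat.mul_assoc, hpow]
    ring
  have e2 : r' * 10 ^ i + q < 10 ^ (L - 1) := by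
    have h1 : r' + 1 ≤ 10 ^ (u - 1) := hr'lt
    calc r' * 10 ^ i + q < r' * 10 ^ i + 10 ^ i := by omega
      _ = (r' + 1) * 10 ^ i := by ring
      _ ≤ 10 ^ (u - 1) * 10 ^ i := Nat.mul_le_mul_right _ h1
      _ = 10 ^ (L - 1) := hpow
  have hdiv : crRot m L i / 10 ^ (L - 1) = d := by
    rw [e1, Nat.add_mul_div_left _ _ (pow_pos (by norm_num : (0:Nat) < 10) _),
      Nat.div_eq_of_lt e2, Nat.zero_add]
  have hmod : crRot m L i % 10 ^ (L - 1) = r' * 10 ^ i + q := by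
    rw [e1, Nat.add_mul_mod_self_left, Nat.mod_eq_of_lt e2]
  have hmm : m % 10 ^ (u - 1) = r' := by
    rw [hr', hr, Nat.mod_mod_of_dvd m (pow_dvd_pow 10 (by omega))]
  have hdv : m / 10 ^ (u - 1) = q * 10 + d := by
    have hsplit : (10:Nat) ^ u = 10 ^ (u - 1) * 10 := by rw [← pow_succ]; congr 1; omega
    have hmeq : m = 10 ^ (u - 1) * (10 * q) + r := by
      rw [hq, hr, ← Nat.mul_assoc, ← hsplit]
      exact (Nat.div_add_mod m _).symm
    conv_lhs => rw [hmeq]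
    rw [Nat.mul_add_div hp10]
    omega
  have hLs : L - (i + 1) = u - 1 := by omega
  rw [hmod, hdiv]
  unfold crRot
  rw [hLs, hmm, hdv]
  ring

-- ---- both ports compute (range L).map (crRot m L ·) ----
theorem foldl_ignore {α β : Type} (F : β → β) (l : List α) : ∀ st : β,
    l.foldl (fun st _ => F st) st = F^[l.length] st := by
  induction l with
  | nil => intro st; rfl
  | cons x xs ih =>
    intro st
    simp only [List.foldl_cons, List.length_cons, ih, Function.iterate_succ_apply]

theorem toChars_natCast (m : Nat) : PySem.Int.toChars (m : Int) = Nat.toDigits 10 m := by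
  unfold PySem.Int.toChars
  rw [if_neg (by omega), Int.toNat_natCast]

theorem portA_eq_map (m : Nat) :
    circular_rotation (m : Int) =
      (List.range (Nat.toDigits 10 m).length).map
        (fun k => ((crRot m (Nat.toDigits 10 m).length k : Nat) : Int)) := by
  unfold circular_rotation
  rw [toChars_natCast]
  set s := Nat.toDigits 10 m with hs
  set L := s.length with hL
  rw [PySem.List.foldl_append_singleton_eq_map
    (fun i => (PySem.Int.ofChars? (PySem.List.slice s (some i) none ++ PySem.List.slice s none (some i))).getD 0)]
  rw [List.nil_append, PySem.List.pyRange_one, List.map_map]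
  rw [show ((L : Int) - 0).toNat = L by omega]
  refine List.map_congr_left (fun k hk => ?_)
  rw [List.mem_range] at hk
  show (PySem.Int.ofChars? (PySem.List.slice s (some (0 + (k : Int))) none ++
      PySem.List.slice s none (some (0 + (k : Int))))).getD 0 = _
  rw [Int.zero_add, PySem.List.slice_from_natCast, PySem.List.slice_to_natCast]
  have hdig : ∀ c ∈ s, c.isDigit = true :=
    fun c hc => Nat.isDigit_of_mem_toDigits (by norm_num) (by norm_num) hc
  have hne : s.drop k ++ s.take k ≠ [] := by
    intro hcon
    have h1 : s.drop k = [] := (List.append_eq_nil_iff.mp hcon).1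
    rw [List.drop_eq_nil_iff] at h1
    omega
  have hdig2 : ∀ c ∈ s.drop k ++ s.take k, c.isDigit = true := by
    intro c hc
    rcases List.mem_append.mp hc with h | h
    · exact hdig c (List.mem_of_mem_drop h)
    · exact hdig c (List.mem_of_mem_take h)
  rw [crOfChars_digits _ hne hdig2]
  obtain ⟨ht, hd⟩ := crVal_take_drop m k (le_of_lt hk)
  rw [crVal_append, ht, hd, List.length_take, min_eq_left (le_of_lt hk)]
  rfl

theorem portB_iter (m L : Nat) (hm : m < 10 ^ L) : ∀ i, i ≤ L →
    (fun st : List Int × Int =>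
        (st.1 ++ [st.2], PySem.Int.mod st.2 ((10 : Int) ^ (L - 1)) * 10 +
          PySem.Int.floordiv st.2 ((10 : Int) ^ (L - 1))))^[i] (([] : List Int), (m : Int)) =
      ((List.range i).map (fun k => ((crRot m L k : Nat) : Int)), ((crRot m L i : Nat) : Int)) := by
  intro i
  induction i with
  | zero =>
    intro _
    simp only [Function.iterate_zero, id_eq, List.range_zero, List.map_nil, crRot_zero m L hm]
  | succ i ih =>
    intro hle
    rw [Function.iterate_succ_apply', ih (by omega)]
    have hcast : ((10 : Int) ^ (L - 1)) = ((10 ^ (L - 1) : Nat) : Int) := by push_cast; ring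
    simp only [hcast, PySem.Int.mod_natCast, PySem.Int.floordiv_natCast]
    rw [List.range_succ, List.map_append]
    refine Prod.ext (by simp) ?_
    show ((crRot m L i % 10 ^ (L - 1) : Nat) : Int) * 10 + ((crRot m L i / 10 ^ (L - 1) : Nat) : Int) =
      ((crRot m L (i + 1) : Nat) : Int)
    rw [crRot_step m L i hm (by omega)]
    push_cast
    ring

theorem portB_eq_map (m : Nat) :
    circular_rotation_alt (m : Int) =
      (List.range (Nat.toDigits 10 m).length).map
        (fun k => ((crRot m (Nat.toDigits 10 m).length k : Nat) : Int)) := by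
  unfold circular_rotation_alt
  rw [toChars_natCast]
  set s := Nat.toDigits 10 m with hs
  set L := s.length with hL
  show (List.foldl (fun st _ =>
      (st.1 ++ [st.2], PySem.Int.mod st.2 ((10 : Int) ^ (L - 1)) * 10 +
        PySem.Int.floordiv st.2 ((10 : Int) ^ (L - 1))))
    (([] : List Int), (m : Int)) (PySem.List.pyRange 0 (L : Int) 1)).1 = _
  rw [foldl_ignore (fun st : List Int × Int =>
      (st.1 ++ [st.2], PySem.Int.mod st.2 ((10 : Int) ^ (L - 1)) * 10 +
        PySem.Int.floordiv st.2 ((10 : Int) ^ (L - 1))))]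
  rw [PySem.List.length_pyRange_one, show ((L : Int) - 0).toNat = L by omega]
  rw [portB_iter m L (lt_pow_len m) L (le_refl L)]

-- ===== VERDICT (by name: the statement is the Claim_ definition above) =====
theorem circular_rotation_spec : Claim_equal_circular_rotation := by
  intro n _ hpre
  unfold Spec_circular_rotation
  obtain ⟨m, rfl⟩ : ∃ m : Nat, n = (m : Int) := ⟨n.toNat, (Int.toNat_of_nonneg hpre).symm⟩
  rw [portA_eq_map, portB_eq_map]
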